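-- pv_equiv track=rewrite | github.com/shoc71/profile-maker | profile_resources/Important/scoring_names/main.py | check_alphabetical_sequence
-- ===== SOURCE A (Python) =====
-- def check_alphabetical_sequence(name, sequence_length=4):
--     # Convert the name to lowercase to make it case-insensitive
--     name = name.lower()
--
--     # Iterate through the name and check for alphabetical sequences
--     for i in range(len(name) - sequence_length + 1):
--         # Check if the next `sequence_length` characters are in alphabetical order
--         is_alphabetical = True
--         for j in range(sequence_length - 1):
--             if ord(name[i + j]) + 1 != ord(name[i + j + 1]):
--                 is_alphabetical = False
--                 break
--         if is_alphabetical: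
--             return True
--     return False
-- ===== SOURCE B (Python) =====
-- def check_alphabetical_sequence(name, sequence_length=4):
--     # A sequence of length <= 0 exists trivially.
--     if sequence_length <= 0:
--         return True
--     run = 0
--     prev = None
--     for ch in name.lower():
--         run = run + 1 if prev is not None and ord(prev) + 1 == ord(ch) else 1
--         if run >= sequence_length:
--             return True
--         prev = ch
--     return False
-- ===== Notes on version B (the rewrite author's own statement) =====
-- stated objective: alternative
-- what changed: Replaced the sliding-window scan (re-checking up to k-1 character pairs at every start index, worst case O(n*k)) by a single left-to-right pass that maintains the length of the current run of consecutive-codepoint characters (worst case O(n)); on typical text both exit early, so a timing run did not consistently confirm a speed-up.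
import Mathlib
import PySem

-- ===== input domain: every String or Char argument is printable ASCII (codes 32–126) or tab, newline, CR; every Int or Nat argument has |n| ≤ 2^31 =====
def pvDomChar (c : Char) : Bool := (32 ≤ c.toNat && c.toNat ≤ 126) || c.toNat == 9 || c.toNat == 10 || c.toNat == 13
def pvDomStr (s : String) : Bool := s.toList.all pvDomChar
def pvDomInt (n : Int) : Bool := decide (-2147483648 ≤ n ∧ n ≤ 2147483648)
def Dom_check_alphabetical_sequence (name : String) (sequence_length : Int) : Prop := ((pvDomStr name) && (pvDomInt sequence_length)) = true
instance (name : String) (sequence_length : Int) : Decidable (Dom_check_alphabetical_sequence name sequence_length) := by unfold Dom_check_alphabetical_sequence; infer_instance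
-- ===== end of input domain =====

-- B replaces A's window-by-window re-scan (worst case O(n*k)) by a single pass tracking the current
-- consecutive-run length (worst case O(n)); measured timings on random text were comparable (both exit early).

-- ===== PORT A =====
-- inner 'for j in range(sequence_length - 1)' loop with its break: is_alphabetical stays true iff every pair check passes
def pvInnerA (s : List Char) (i : Int) (k : Int) : Bool :=
  (PySem.List.pyRange 0 (k - 1) 1).all (fun j =>
    match PySem.List.pyGet? s (i + j), PySem.List.pyGet? s (i + j + 1) with
    | some a, some b => a.toNat + 1 == b.toNat
    | _, _ => false)

-- outer 'for i in range(len(name) - sequence_length + 1)' with its early 'return True':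
-- Python's range is lazy, so the loop is ported as index recursion from 0 to the stop value
def pvOuterA (s : List Char) (k : Int) (stop : Int) (i : Int) : Bool :=
  if i < stop then
    if pvInnerA s i k then true else pvOuterA s k stop (i + 1)
  else false
termination_by (stop - i).toNat
decreasing_by omega

def check_alphabetical_sequence (name : String) (sequence_length : Int) : Bool :=
  let s := (PySem.Str.lower name).toList
  pvOuterA s sequence_length ((s.length : Int) - sequence_length + 1) 0

-- ===== PORT B =====
-- single pass: run = length of the current consecutive-codepoint run ending at prev
def pvRunLoop (k : Int) : List Char → Option Char → Int → Bool
  | [], _, _ => false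
  | ch :: rest, prev, run =>
    let run' : Int := match prev with
      | some p => if p.toNat + 1 == ch.toNat then run + 1 else 1
      | none => 1
    if k ≤ run' then true else pvRunLoop k rest (some ch) run'

def check_alphabetical_sequence_alt (name : String) (sequence_length : Int) : Bool :=
  if sequence_length ≤ 0 then true
  else pvRunLoop sequence_length ((PySem.Str.lower name).toList) none 0

-- ===== PRECONDITION & SPEC =====
def Spec_check_alphabetical_sequence (name : String) (sequence_length : Int) (out : Bool) : Prop := out = check_alphabetical_sequence_alt name sequence_length
instance (name : String) (sequence_length : Int) (out : Bool) : Decidable (Spec_check_alphabetical_sequence name sequence_length out) := by unfold Spec_check_alphabetical_sequence; infer_instance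

-- ===== CLAIM (what is proved, stated in full; the proofs are below) =====
def Claim_equal_check_alphabetical_sequence : Prop := ∀ (name : String) (sequence_length : Int), Dom_check_alphabetical_sequence name sequence_length → Spec_check_alphabetical_sequence name sequence_length (check_alphabetical_sequence name sequence_length)

-- ===== LEMMAS AND PROOFS =====

-- 'pvExt p t q = true' iff the first q chars of t continue the codepoint chain started at p
def pvExt : Char → List Char → Nat → Bool
  | _, _, 0 => true
  | _, [], _+1 => false
  | p, c :: t, q+1 => (p.toNat + 1 == c.toNat) && pvExt c t q

-- 'some suffix of s starts with an m-long consecutive chain'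
def pvHas : List Char → Nat → Bool
  | [], _ => false
  | c :: t, m => (match m with | 0 => true | m'+1 => pvExt c t m') || pvHas t m

-- the m-window starting at index i is a consecutive chain
def pvChainAt (s : List Char) (i m : Nat) : Prop :=
  ∀ j, j + 1 < m → (s.getD (i+j) 'a').toNat + 1 = (s.getD (i+j+1) 'a').toNat

lemma pvExt_mono (t : List Char) : ∀ (c : Char) (q q' : Nat), q ≤ q' → pvExt c t q' = true → pvExt c t q = true := by
  induction t with
  | nil =>
    intro c q q' hle h
    cases q with
    | zero => rfl
    | succ n => cases q' with
      | zero => omega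
      | succ n' => simp [pvExt] at h
  | cons b t ih =>
    intro c q q' hle h
    cases q with
    | zero => rfl
    | succ n => cases q' with
      | zero => omega
      | succ n' =>
        simp only [pvExt, Bool.and_eq_true] at h ⊢
        exact ⟨h.1, ih b n n' (by omega) h.2⟩

lemma pvExt_char (t : List Char) : ∀ (c : Char) (q : Nat),
    pvExt c t q = true ↔ q ≤ t.length ∧ pvChainAt (c :: t) 0 (q+1) := by
  induction t with
  | nil =>
    intro c q
    cases q with
    | zero =>
      simp only [pvExt, pvChainAt, List.length_nil, true_iff]
      exact ⟨Nat.le_refl 0, fun j hj => by omega⟩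
    | succ n => simp [pvExt]
  | cons b t ih =>
    intro c q
    cases q with
    | zero =>
      simp only [pvExt, pvChainAt, true_iff]
      exact ⟨Nat.zero_le _, fun j hj => by omega⟩
    | succ n =>
      simp only [pvExt, Bool.and_eq_true, beq_iff_eq, ih b n, List.length_cons, pvChainAt]
      constructor
      · rintro ⟨h1, h2, h3⟩
        refine ⟨by omega, ?_⟩
        intro j hj
        cases j with
        | zero => simpa using h1
        | succ j' =>
          have := h3 j' (by omega)
          simpa using this
      · rintro ⟨h1, h2⟩
        refine ⟨by simpa using h2 0 (by omega), by omega, ?_⟩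
        intro j hj
        have := h2 (j+1) (by omega)
        simpa using this

lemma pvChainAt_cons (c : Char) (t : List Char) (i m : Nat) :
    pvChainAt (c :: t) (i+1) m ↔ pvChainAt t i m := by
  unfold pvChainAt
  constructor
  · intro h j hj
    have := h j hj
    rwa [show i+1+j = (i+j)+1 from by omega, List.getD_cons_succ, List.getD_cons_succ] at this
  · intro h j hj
    rw [show i+1+j = (i+j)+1 from by omega, List.getD_cons_succ, List.getD_cons_succ]
    exact h j hj

lemma pvHas_char (s : List Char) : ∀ (m : Nat), 1 ≤ m →
    (pvHas s m = true ↔ ∃ i, i + m ≤ s.length ∧ pvChainAt s i m) := by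
  induction s with
  | nil =>
    intro m hm
    simp only [pvHas, List.length_nil, Bool.false_eq_true, false_iff]
    rintro ⟨i, hi, -⟩
    omega
  | cons c t ih =>
    intro m hm
    obtain ⟨m', hm'⟩ : ∃ m', m = m' + 1 := ⟨m - 1, by omega⟩
    subst hm'
    simp only [pvHas, Bool.or_eq_true, pvExt_char, List.length_cons]
    constructor
    · rintro (⟨h1, h2⟩ | h)
      · exact ⟨0, by omega, h2⟩
      · by_cases hm1 : 1 ≤ m' + 1
        · obtain ⟨i, hi, hc⟩ := (ih (m'+1) hm1).mp h
          exact ⟨i+1, by omega, (pvChainAt_cons c t i (m'+1)).mpr hc⟩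
        · omega
    · rintro ⟨i, hi, hc⟩
      cases i with
      | zero => exact Or.inl ⟨by omega, hc⟩
      | succ i' =>
        right
        exact (ih (m'+1) (by omega)).mpr ⟨i', by omega, (pvChainAt_cons c t i' (m'+1)).mp hc⟩

lemma pvRunLoop_inv (m : Nat) (s : List Char) : ∀ (p : Char) (r : Nat), 1 ≤ r → r < m →
    pvRunLoop (m : Int) s (some p) (r : Int) = (pvExt p s (m - r) || pvHas s m) := by
  induction s with
  | nil =>
    intro p r h1 h2
    obtain ⟨q, hq⟩ : ∃ q, m - r = q + 1 := ⟨m - r - 1, by omega⟩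
    simp [pvRunLoop, pvHas, hq, pvExt]
  | cons ch rest ih =>
    intro p r h1 h2
    simp only [pvRunLoop]
    by_cases hpc : p.toNat + 1 = ch.toNat
    · simp only [hpc, beq_self_eq_true, if_pos]
      by_cases hr : r + 1 = m
      · have hc : (m : Int) ≤ (r : Int) + 1 := by omega
        rw [if_pos hc]
        obtain ⟨q, hq⟩ : ∃ q, m - r = q + 1 := ⟨m - r - 1, by omega⟩
        have hq0 : q = 0 := by omega
        simp [hq, hq0, pvExt, hpc]
      · have hc : ¬ ((m : Int) ≤ (r : Int) + 1) := by omega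
        rw [if_neg hc]
        have : ((r : Int) + 1) = ((r + 1 : Nat) : Int) := by push_cast; ring
        rw [this, ih ch (r + 1) (by omega) (by omega)]
        obtain ⟨q, hq⟩ : ∃ q, m - r = q + 1 := ⟨m - r - 1, by omega⟩
        obtain ⟨m', hm'⟩ : ∃ m', m = m' + 1 := ⟨m - 1, by omega⟩
        have hq' : m - (r + 1) = q := by omega
        have hm'' : m' = m - 1 := by omega
        simp only [hm', pvHas]
        have h2' : m' - r = q := by omega
        by_cases he : pvExt ch rest m' = true
        · have hqe : pvExt ch rest q = true := pvExt_mono rest ch q m' (by omega) he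
          simp [h2', hqe, he]
        · have h3 : m' + 1 - r = q + 1 := by omega
          simp [h2', h3, pvExt, hpc, he]
    · have hbeq : (p.toNat + 1 == ch.toNat) = false := by simpa using hpc
      simp only [hbeq, Bool.false_eq_true, if_false]
      have hc : ¬ ((m : Int) ≤ (1 : Int)) := by omega
      rw [if_neg hc]
      have h1' : ((1 : Int)) = ((1 : Nat) : Int) := by norm_num
      rw [h1', ih ch 1 (by omega) (by omega)]
      obtain ⟨m', hm'⟩ : ∃ m', m = m' + 1 := ⟨m - 1, by omega⟩
      have hd1 : m - 1 = m' := by omega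
      have hd2 : m - r = (m' - r) + 1 := by omega
      rw [hd1, hd2, hm']
      simp [pvExt, pvHas, hbeq]

lemma pvB_eq_has (s : List Char) (m : Nat) (hm : 1 ≤ m) :
    pvRunLoop (m : Int) s none 0 = pvHas s m := by
  cases s with
  | nil => simp [pvRunLoop, pvHas]
  | cons ch rest =>
    simp only [pvRunLoop]
    by_cases h1 : m = 1
    · subst h1
      simp [pvHas, pvExt]
    · have hc : ¬ ((m : Int) ≤ (1 : Int)) := by omega
      rw [if_neg hc]
      have h1' : ((1 : Int)) = ((1 : Nat) : Int) := by norm_num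
      rw [h1', pvRunLoop_inv m rest ch 1 (by omega) (by omega)]
      obtain ⟨m', hm'⟩ : ∃ m', m = m' + 1 := ⟨m - 1, by omega⟩
      have hd1 : m - 1 = m' := by omega
      rw [hd1, hm']
      simp [pvHas]

lemma pvInnerA_char (s : List Char) (m i : Nat) (hm : 1 ≤ m) (hi : i + m ≤ s.length) :
    (pvInnerA s (i : Int) (m : Int) = true ↔ pvChainAt s i m) := by
  unfold pvInnerA pvChainAt
  have hcast : (m : Int) - 1 = ((m - 1 : Nat) : Int) := by omega
  rw [hcast, PySem.List.pyRange_zero_nat, List.all_map, List.all_eq_true]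
  constructor
  · intro h j hj
    have hx := h j (List.mem_range.mpr (by omega))
    simp only [Function.comp] at hx
    rw [show ((i : Int) + (j : Int)) = ((i + j : Nat) : Int) from by push_cast; ring] at hx
    rw [show (((i + j : Nat) : Int) + 1) = ((i + j + 1 : Nat) : Int) from by push_cast; ring] at hx
    rw [PySem.List.pyGet?_natCast, PySem.List.pyGet?_natCast,
        List.getElem?_eq_getElem (show i + j < s.length by omega),
        List.getElem?_eq_getElem (show i + j + 1 < s.length by omega)] at hx
    simp only [beq_iff_eq] at hx
    rw [List.getD_eq_getElem s 'a' (show i + j < s.length by omega),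
        List.getD_eq_getElem s 'a' (show i + j + 1 < s.length by omega)]
    exact hx
  · intro h j hj
    have hjm : j < m - 1 := List.mem_range.mp hj
    simp only [Function.comp]
    rw [show ((i : Int) + (j : Int)) = ((i + j : Nat) : Int) from by push_cast; ring]
    rw [show (((i + j : Nat) : Int) + 1) = ((i + j + 1 : Nat) : Int) from by push_cast; ring]
    rw [PySem.List.pyGet?_natCast, PySem.List.pyGet?_natCast,
        List.getElem?_eq_getElem (show i + j < s.length by omega),
        List.getElem?_eq_getElem (show i + j + 1 < s.length by omega)]
    simp only [beq_iff_eq]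
    have hc := h j (by omega)
    rwa [List.getD_eq_getElem s 'a' (show i + j < s.length by omega),
         List.getD_eq_getElem s 'a' (show i + j + 1 < s.length by omega)] at hc

lemma pvOuterA_eq_any (s : List Char) (k : Int) (stop : Int) : ∀ (i : Int),
    pvOuterA s k stop i = (PySem.List.pyRange i stop 1).any (fun x => pvInnerA s x k) := by
  suffices h : ∀ (n : Nat) (i : Int), (stop - i).toNat = n →
      pvOuterA s k stop i = (PySem.List.pyRange i stop 1).any (fun x => pvInnerA s x k) from
    fun i => h (stop - i).toNat i rfl
  intro n
  induction n with
  | zero =>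
    intro i hn
    rw [pvOuterA, if_neg (by omega), PySem.List.pyRange_one_eq_nil (by omega)]
    rfl
  | succ n ih =>
    intro i hn
    rw [pvOuterA, if_pos (by omega), PySem.List.pyRange_one_cons (by omega), List.any_cons]
    by_cases hin : pvInnerA s i k = true
    · simp [hin]
    · simp [hin, ih (i + 1) (by omega)]

lemma pvA_eq_has (s : List Char) (m : Nat) (hm : 1 ≤ m) :
    pvOuterA s (m : Int) ((s.length : Int) - (m : Int) + 1) 0 = pvHas s m := by
  rw [pvOuterA_eq_any, Bool.eq_iff_iff, List.any_eq_true, pvHas_char s m hm]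
  constructor
  · rintro ⟨x, hmem, hx⟩
    rw [PySem.List.mem_pyRange_one] at hmem
    obtain ⟨h0, hlt⟩ := hmem
    obtain ⟨i, rfl⟩ : ∃ i : Nat, x = (i : Int) := ⟨x.toNat, by omega⟩
    have hi : i + m ≤ s.length := by omega
    exact ⟨i, hi, (pvInnerA_char s m i hm hi).mp hx⟩
  · rintro ⟨i, hi, hc⟩
    refine ⟨(i : Int), ?_, (pvInnerA_char s m i hm hi).mpr hc⟩
    rw [PySem.List.mem_pyRange_one]
    constructor <;> omega

lemma pvA_nonpos (s : List Char) (k : Int) (hk : k ≤ 0) :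
    pvOuterA s k ((s.length : Int) - k + 1) 0 = true := by
  have hn : (0 : Int) ≤ (s.length : Int) := by positivity
  rw [pvOuterA_eq_any, PySem.List.pyRange_one_cons (by omega)]
  simp only [List.any_cons, Bool.or_eq_true]
  left
  unfold pvInnerA
  rw [PySem.List.pyRange_one_eq_nil (by omega)]
  rfl

-- ===== VERDICT (by name: the statement is the Claim_ definition above) =====
theorem check_alphabetical_sequence_spec : Claim_equal_check_alphabetical_sequence := by
  intro name k _
  unfold Spec_check_alphabetical_sequence check_alphabetical_sequence check_alphabetical_sequence_alt
  set s := (PySem.Str.lower name).toList with hs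
  by_cases hk : k ≤ 0
  · simp only [if_pos hk]
    exact pvA_nonpos s k hk
  · have hk1 : 1 ≤ k := by omega
    obtain ⟨m, rfl⟩ : ∃ m : Nat, k = (m : Int) := ⟨k.toNat, by omega⟩
    have hm : 1 ≤ m := by exact_mod_cast hk1
    simp only [if_neg hk]
    rw [pvB_eq_has s m hm, ← pvA_eq_has s m hm]
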